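-- pv_equiv track=rewrite | github.com/jonth4n-legit/Uhuy | AutoCloudSkill.exe_extracted/AutoCloudSkill_Professional_V2/gui/main_window.py | _choose_confirmation_link
-- ===== SOURCE A (Python) =====
-- def _choose_confirmation_link(links: list) -> str:
--     """Choose the best confirmation link from available links."""
--     # Prefer Google redirect links
--     for link in links:
--         if 'notifications.googleapis.com/email/redirect' in link.lower():
--             return link
--
--     # Fall back to CloudSkills links
--     for link in links:
--         link_lower = link.lower()
--         if ('cloudskillsboost.google' in link_lower or
--             '/users/confirmation' in link_lower or
--             'confirm' in link_lower):
--             return link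
--
--     # Use first link as last resort
--     return links[0] if links else ""
-- ===== SOURCE B (Python) =====
-- def _choose_confirmation_link(links: list) -> str:
--     """Choose the best confirmation link from available links."""
--     best_rank = 3
--     best_link = ""
--     for link in links:
--         low = link.lower()
--         if 'notifications.googleapis.com/email/redirect' in low:
--             return link
--         rank = 1 if ('cloudskillsboost.google' in low or
--                      '/users/confirmation' in low or
--                      'confirm' in low) else 2
--         if rank < best_rank:
--             best_rank = rank
--             best_link = link
--     return best_link
-- ===== Notes on version B (the rewrite author's own statement) =====
-- stated objective: alternative
-- what changed: Replaces A's two sequential scans plus a final head fallback with a single ranked pass that early-returns on a Google-redirect link and otherwise tracks the earliest lowest-rank link; measured ~1.2x at the largest size, below the 1.5x confirmation bar.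
import Mathlib
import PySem

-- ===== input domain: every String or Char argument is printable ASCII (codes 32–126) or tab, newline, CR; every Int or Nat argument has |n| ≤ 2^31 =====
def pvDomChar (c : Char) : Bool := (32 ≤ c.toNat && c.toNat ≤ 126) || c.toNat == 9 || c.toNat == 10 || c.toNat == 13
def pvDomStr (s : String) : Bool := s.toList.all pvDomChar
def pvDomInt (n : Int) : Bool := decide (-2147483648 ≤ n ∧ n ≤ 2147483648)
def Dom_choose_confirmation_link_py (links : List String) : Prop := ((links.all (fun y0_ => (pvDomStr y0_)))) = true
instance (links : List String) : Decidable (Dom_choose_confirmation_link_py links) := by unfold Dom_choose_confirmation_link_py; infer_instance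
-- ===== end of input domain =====

-- B replaces A's two sequential scans with one ranked pass (early return on the
-- Google-redirect rank), lowercasing/testing each link at most once.

-- ===== PORT A =====
-- first loop of A: return the first Google-redirect link
def chooseA_loop1 : List String → Option String
  | [] => none
  | link :: rest =>
    if PySem.Str.isIn "notifications.googleapis.com/email/redirect" (PySem.Str.lower link) then
      some link
    else chooseA_loop1 rest

-- second loop of A: return the first fallback (CloudSkills/confirm) link
def chooseA_loop2 : List String → Option String
  | [] => none
  | link :: rest =>
    let link_lower := PySem.Str.lower link
    if PySem.Str.isIn "cloudskillsboost.google" link_lower ||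
       PySem.Str.isIn "/users/confirmation" link_lower ||
       PySem.Str.isIn "confirm" link_lower then
      some link
    else chooseA_loop2 rest

def choose_confirmation_link_py (links : List String) : String :=
  match chooseA_loop1 links with
  | some link => link
  | none =>
    match chooseA_loop2 links with
    | some link => link
    | none => match links with
              | [] => ""
              | link :: _ => link

-- ===== PORT B =====
-- single pass: early return on rank 0; otherwise keep (best_rank, best_link)
def chooseB_loop : List String → Nat → String → String
  | [], _, best_link => best_link
  | link :: rest, best_rank, best_link =>
    let low := PySem.Str.lower link
    if PySem.Str.isIn "notifications.googleapis.com/email/redirect" low then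
      link
    else
      let rank : Nat :=
        if PySem.Str.isIn "cloudskillsboost.google" low ||
           PySem.Str.isIn "/users/confirmation" low ||
           PySem.Str.isIn "confirm" low then 1 else 2
      if rank < best_rank then chooseB_loop rest rank link
      else chooseB_loop rest best_rank best_link

def choose_confirmation_link_py_alt (links : List String) : String :=
  chooseB_loop links 3 ""

-- ===== PRECONDITION & SPEC =====
def Spec_choose_confirmation_link_py (links : List String) (out : String) : Prop := out = choose_confirmation_link_py_alt links
instance (links : List String) (out : String) : Decidable (Spec_choose_confirmation_link_py links out) := by unfold Spec_choose_confirmation_link_py; infer_instance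

-- ===== CLAIM (what is proved, stated in full; the proofs are below) =====
def Claim_equal_choose_confirmation_link_py : Prop := ∀ (links : List String), Dom_choose_confirmation_link_py links → Spec_choose_confirmation_link_py links (choose_confirmation_link_py links)

-- ===== LEMMAS AND PROOFS =====
-- the two predicates the programs test
def pvG (link : String) : Bool :=
  PySem.Str.isIn "notifications.googleapis.com/email/redirect" (PySem.Str.lower link)
def pvF (link : String) : Bool :=
  PySem.Str.isIn "cloudskillsboost.google" (PySem.Str.lower link) ||
  PySem.Str.isIn "/users/confirmation" (PySem.Str.lower link) ||
  PySem.Str.isIn "confirm" (PySem.Str.lower link)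

lemma chooseA_loop1_eq_find? (links : List String) :
    chooseA_loop1 links = links.find? pvG := by
  induction links with
  | nil => rfl
  | cons l ls ih =>
    show (if pvG l = true then some l else chooseA_loop1 ls) = _
    by_cases hg : pvG l = true
    · rw [if_pos hg, List.find?_cons_of_pos hg]
    · rw [if_neg hg, List.find?_cons_of_neg (by simpa using hg), ih]

lemma chooseA_loop2_eq_find? (links : List String) :
    chooseA_loop2 links = links.find? pvF := by
  induction links with
  | nil => rfl
  | cons l ls ih =>
    show (if pvF l = true then some l else chooseA_loop2 ls) = _
    by_cases hf : pvF l = true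
    · rw [if_pos hf, List.find?_cons_of_pos hf]
    · rw [if_neg hf, List.find?_cons_of_neg (by simpa using hf), ih]

-- one step of B's loop, phrased with pvG/pvF
lemma chooseB_loop_cons (l : String) (ls : List String) (r : Nat) (b : String) :
    chooseB_loop (l :: ls) r b =
      if pvG l = true then l
      else if (if pvF l = true then 1 else 2) < r then
        chooseB_loop ls (if pvF l = true then 1 else 2) l
      else chooseB_loop ls r b := rfl

-- behaviour of B's loop with best_rank = 1 (a fallback link already held)
lemma chooseB_loop_one (links : List String) (b : String) :
    chooseB_loop links 1 b =
      match links.find? pvG with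
      | some l => l
      | none => b := by
  induction links generalizing b with
  | nil => rfl
  | cons l ls ih =>
    rw [chooseB_loop_cons]
    by_cases hg : pvG l = true
    · rw [if_pos hg, List.find?_cons_of_pos hg]
    · rw [if_neg hg, List.find?_cons_of_neg (by simpa using hg),
        if_neg (by split_ifs <;> omega), ih]

-- behaviour of B's loop with best_rank = 2 (an ordinary link already held)
lemma chooseB_loop_two (links : List String) (b : String) :
    chooseB_loop links 2 b =
      match links.find? pvG with
      | some l => l
      | none =>
        match links.find? pvF with
        | some l => l
        | none => b := by
  induction links generalizing b with
  | nil => rfl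
  | cons l ls ih =>
    rw [chooseB_loop_cons]
    by_cases hg : pvG l = true
    · rw [if_pos hg, List.find?_cons_of_pos hg]
    · rw [if_neg hg, List.find?_cons_of_neg (by simpa using hg)]
      by_cases hf : pvF l = true
      · simp only [if_pos hf]
        rw [if_pos (by omega), List.find?_cons_of_pos hf, chooseB_loop_one]
      · simp only [if_neg hf]
        rw [if_neg (by omega), List.find?_cons_of_neg (by simpa using hf), ih]

-- behaviour of B's loop from the initial state
lemma chooseB_loop_start (links : List String) :
    chooseB_loop links 3 "" =
      match links.find? pvG with
      | some l => l
      | none =>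
        match links.find? pvF with
        | some l => l
        | none => links.headD "" := by
  cases links with
  | nil => rfl
  | cons l ls =>
    rw [chooseB_loop_cons]
    by_cases hg : pvG l = true
    · rw [if_pos hg, List.find?_cons_of_pos hg]
    · rw [if_neg hg, List.find?_cons_of_neg (by simpa using hg),
        if_pos (by split_ifs <;> omega)]
      by_cases hf : pvF l = true
      · simp only [if_pos hf]
        rw [List.find?_cons_of_pos hf, chooseB_loop_one]
      · simp only [if_neg hf]
        rw [List.find?_cons_of_neg (by simpa using hf), chooseB_loop_two]
        cases ls.find? pvG <;> cases ls.find? pvF <;> rfl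

-- ===== VERDICT (by name: the statement is the Claim_ definition above) =====
theorem choose_confirmation_link_py_spec : Claim_equal_choose_confirmation_link_py := by
  intro links _
  unfold Spec_choose_confirmation_link_py choose_confirmation_link_py choose_confirmation_link_py_alt
  rw [chooseB_loop_start, chooseA_loop1_eq_find?, chooseA_loop2_eq_find?]
  cases links.find? pvG <;> cases links.find? pvF <;> cases links <;> rfl
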